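-- pv_equiv track=rewrite | github.com/nkzhaoxue/cwi2016 | scripts/verify_bug.py | checkForBug
-- ===== SOURCE A (Python) =====
-- def checkForBug(decisions):
--     # decisions is list of tuples (idx, lbl)
--     seen_one = False
--     seen_zero = False
--     for pair in decisions:
--         if pair[1] == '0':
--             seen_zero = True
--             if seen_one:
--                 return '10'
--         elif pair[1] == '1':
--             seen_one=True
--             if seen_zero:
--                 return '01'
--
--     return '00'
-- ===== SOURCE B (Python) =====
-- def checkForBug(decisions):
--     labels = [lbl for _, lbl in decisions]
--     i0 = next((i for i, l in enumerate(labels) if l == '0'), None)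
--     i1 = next((i for i, l in enumerate(labels) if l == '1'), None)
--     if i0 is None or i1 is None:
--         return '00'
--     return '10' if i1 < i0 else '01'
-- ===== Notes on version B (the rewrite author's own statement) =====
-- stated objective: simpler
-- what changed: Replaces A's flag-tracking early-exit loop with two first-occurrence index lookups over the labels followed by a single comparison.
import Mathlib
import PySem

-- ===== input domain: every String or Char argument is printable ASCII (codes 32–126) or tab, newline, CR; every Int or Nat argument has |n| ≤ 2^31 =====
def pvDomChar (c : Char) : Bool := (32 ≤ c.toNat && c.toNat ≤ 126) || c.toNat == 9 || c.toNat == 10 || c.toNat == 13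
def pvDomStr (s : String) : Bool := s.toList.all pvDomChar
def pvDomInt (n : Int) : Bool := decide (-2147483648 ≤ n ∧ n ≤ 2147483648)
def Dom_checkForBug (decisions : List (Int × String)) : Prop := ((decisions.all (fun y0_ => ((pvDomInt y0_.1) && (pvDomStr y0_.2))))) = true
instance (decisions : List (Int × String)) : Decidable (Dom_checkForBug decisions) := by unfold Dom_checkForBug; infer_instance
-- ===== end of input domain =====

-- B replaces A's flag-tracking early-exit loop with two first-occurrence lookups and a comparison (objective: simpler).


-- ===== PORT A =====
-- A's loop over `decisions` with mutable flags seen_one/seen_zero and early returns.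
def checkForBugGo : List (Int × String) → Bool → Bool → String
  | [], _, _ => "00"
  | pair :: rest, seenOne, seenZero =>
    if pair.2 == "0" then
      if seenOne then "10" else checkForBugGo rest seenOne true
    else if pair.2 == "1" then
      if seenZero then "01" else checkForBugGo rest true seenZero
    else
      checkForBugGo rest seenOne seenZero

def checkForBug (decisions : List (Int × String)) : String :=
  checkForBugGo decisions false false

-- ===== PORT B =====
-- B: take the labels, find the first index of '0' and of '1'; compare them.
def checkForBug_alt (decisions : List (Int × String)) : String :=
  let labels := decisions.map Prod.snd
  match labels.findIdx? (· == "0"), labels.findIdx? (· == "1") with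
  | some i0, some i1 => if i1 < i0 then "10" else "01"
  | _, _ => "00"

-- ===== PRECONDITION & SPEC =====
def Spec_checkForBug (decisions : List (Int × String)) (out : String) : Prop := out = checkForBug_alt decisions
instance (decisions : List (Int × String)) (out : String) : Decidable (Spec_checkForBug decisions out) := by unfold Spec_checkForBug; infer_instance

-- ===== CLAIM (what is proved, stated in full; the proofs are below) =====
def Claim_equal_checkForBug : Prop := ∀ (decisions : List (Int × String)), Dom_checkForBug decisions → Spec_checkForBug decisions (checkForBug decisions)

-- ===== LEMMAS AND PROOFS =====

-- With seen_one already set, A returns '10' iff some '0' label remains, else '00'.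
theorem go_one_set (d : List (Int × String)) :
    checkForBugGo d true false =
      (if (d.map Prod.snd).findIdx? (· == "0") |>.isSome then "10" else "00") := by
  induction d with
  | nil => simp [checkForBugGo]
  | cons p rest ih =>
    simp only [checkForBugGo, List.map_cons, List.findIdx?_cons]
    by_cases h0 : p.2 == "0"
    · simp [h0]
    · by_cases h1 : p.2 == "1" <;>
        simp only [h0, h1, ih, if_false, if_true, Bool.false_eq_true, Option.isSome_map,
          Option.isSome_some, if_true]

-- With seen_zero already set, A returns '01' iff some '1' label remains, else '00'.
theorem go_zero_set (d : List (Int × String)) :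
    checkForBugGo d false true =
      (if (d.map Prod.snd).findIdx? (· == "1") |>.isSome then "01" else "00") := by
  induction d with
  | nil => simp [checkForBugGo]
  | cons p rest ih =>
    simp only [checkForBugGo, List.map_cons, List.findIdx?_cons]
    by_cases h0 : p.2 == "0"
    · have h1 : ¬ (p.2 == "1") = true := by simp_all
      simp only [h0, h1, ih, if_true, if_false, Bool.false_eq_true, Option.isSome_map,
        Option.isSome_some]
    · by_cases h1 : p.2 == "1" <;>
        simp only [h0, h1, ih, if_false, if_true, Bool.false_eq_true, Option.isSome_map,
          Option.isSome_some, if_true]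

theorem checkForBug_eq (decisions : List (Int × String)) :
    checkForBug decisions = checkForBug_alt decisions := by
  unfold checkForBug
  induction decisions with
  | nil => rfl
  | cons p rest ih =>
    simp only [checkForBugGo, checkForBug_alt, List.map_cons, List.findIdx?_cons] at ih ⊢
    by_cases h0 : p.2 == "0"
    · have h1 : ¬ (p.2 == "1") = true := by simp_all
      simp only [h0, h1, if_true, if_false, Bool.false_eq_true]
      rw [go_zero_set]
      cases hf : (rest.map Prod.snd).findIdx? (· == "1") <;> simp
    · by_cases h1 : p.2 == "1"
      · simp only [h0, h1, if_true, if_false, Bool.false_eq_true]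
        rw [go_one_set]
        cases hf : (rest.map Prod.snd).findIdx? (· == "0") <;> simp
      · simp only [h0, h1, if_false, Bool.false_eq_true]
        rw [ih]
        cases (rest.map Prod.snd).findIdx? (· == "0") <;>
          cases (rest.map Prod.snd).findIdx? (· == "1") <;>
          simp [Option.map]

-- ===== VERDICT (by name: the statement is the Claim_ definition above) =====
theorem checkForBug_spec : Claim_equal_checkForBug :=
  fun decisions _ => checkForBug_eq decisions
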